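-- pv_equiv track=rewrite | github.com/moltenpurpur/task-spell-checker | dictionary/create_dictionary_for_main.py | letter_dictionary
-- ===== SOURCE A (Python) =====
-- def letter_dictionary(big_dict: dict) -> dict:
--     dict_letters = {}
--     for key in big_dict.keys():
--         for word in big_dict.get(key):
--             if dict_letters.get(word[0]):
--                 if key[0] not in dict_letters.get(word[0]):
--                     tmp = dict_letters.get(word[0]) + [key[0]]
--                     dict_letters.update({word[0]: tmp})
--                 else:
--                     continue
--             else:
--                 dict_letters[word[0]] = [key[0]]
--     return dict_letters
-- ===== SOURCE B (Python) =====
-- def letter_dictionary(big_dict: dict) -> dict: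
--     # Flatten the input to one stream of (word-initial, key-initial) pairs,
--     # then group: for each distinct word-initial (first-occurrence order)
--     # scan the stream once and collect its distinct key-initials in order.
--     pairs = [(word[0], key[0]) for key, words in big_dict.items() for word in words]
--     return {w: list(dict.fromkeys(k for ww, k in pairs if ww == w))
--             for w in dict.fromkeys(ww for ww, _ in pairs)}
-- ===== Notes on version B (the rewrite author's own statement) =====
-- stated objective: alternative
-- what changed: A builds the dict incrementally inside nested loops, guarding every append with a membership scan of the stored list; B never updates a dict while traversing: it first flattens the input to a stream of (word-initial, key-initial) pairs and then groups by word-initial with one filtering scan of the stream per distinct word-initial, deduplicating with dict.fromkeys.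
import Mathlib
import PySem

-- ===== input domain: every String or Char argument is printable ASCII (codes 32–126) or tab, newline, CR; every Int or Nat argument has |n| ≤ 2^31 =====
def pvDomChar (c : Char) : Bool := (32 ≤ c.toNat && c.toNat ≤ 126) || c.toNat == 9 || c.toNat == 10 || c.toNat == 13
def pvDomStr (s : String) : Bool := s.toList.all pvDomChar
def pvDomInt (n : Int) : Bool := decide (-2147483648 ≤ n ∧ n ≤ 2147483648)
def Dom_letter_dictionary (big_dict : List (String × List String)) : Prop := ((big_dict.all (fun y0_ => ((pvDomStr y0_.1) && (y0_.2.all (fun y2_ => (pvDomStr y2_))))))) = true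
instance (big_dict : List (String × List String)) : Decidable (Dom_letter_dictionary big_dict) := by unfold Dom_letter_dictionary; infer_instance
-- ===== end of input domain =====

-- B replaces A's incremental dict-building nested loops by a flatten-then-group-by
-- structure (flatten to (word-initial, key-initial) pairs, then one filtering scan per
-- distinct word-initial); alternative decomposition, same results, proved equal.


-- ===== PORT A =====
-- one iteration of A's inner loop body; word[0]/key[0] are PySem.Str.pyGet? (none = IndexError,
-- which Pre_ excludes, so the `none` branches are unreachable on admitted inputs).
-- `if dict_letters.get(word[0]):` tests truthiness: the stored lists are never empty, so
-- `getD _ [] ≠ []` (none or an empty list are both falsy) is exact.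
def letter_dictionary_word_step (dict_letters : PySem.Dict String (List String))
    (key word : String) : PySem.Dict String (List String) :=
  match PySem.Str.pyGet? word 0, PySem.Str.pyGet? key 0 with
  | some wc, some kc =>
    let w0 : String := String.ofList [wc]
    let k0 : String := String.ofList [kc]
    let l := dict_letters.getD w0 []
    if l ≠ [] then
      if k0 ∉ l then dict_letters.insert w0 (l ++ [k0])   -- tmp = get + [key[0]]; update
      else dict_letters                                    -- continue
    else dict_letters.insert w0 [k0]
  | _, _ => dict_letters

def letter_dictionary (big_dict : List (String × List String)) : List (String × List String) :=
  (big_dict.foldl (fun dict_letters kv =>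
      kv.2.foldl (fun dict_letters word => letter_dictionary_word_step dict_letters kv.1 word)
        dict_letters)
    PySem.Dict.empty).items

-- ===== PORT B =====
-- the flattening comprehension: (word[0], key[0]) for every word; pyGet? none (IndexError,
-- excluded by Pre_) is skipped so the port stays total.
def letter_dictionary_alt_pair (key word : String) : Option (String × String) :=
  match PySem.Str.pyGet? word 0, PySem.Str.pyGet? key 0 with
  | some wc, some kc => some (String.ofList [wc], String.ofList [kc])
  | _, _ => none

def letter_dictionary_alt_pairs (big_dict : List (String × List String)) : List (String × String) :=
  big_dict.flatMap (fun kv => kv.2.filterMap (letter_dictionary_alt_pair kv.1))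

-- dict.fromkeys = distinct elements in first-occurrence order = PySem.Set.ofList (exact);
-- the outer comprehension's keys are distinct, so the dict is just this list of pairs.
def letter_dictionary_alt (big_dict : List (String × List String)) : List (String × List String) :=
  let pairs := letter_dictionary_alt_pairs big_dict
  (PySem.Set.ofList (pairs.map Prod.fst)).map (fun w =>
    (w, PySem.Set.ofList ((pairs.filter (fun q => q.1 == w)).map Prod.snd)))

-- ===== PRECONDITION & SPEC =====
-- Pre_ excludes exactly the inputs on which the Python A raises IndexError: an empty string
-- among the word lists (word[0]), or an empty key whose word list is nonempty (key[0]).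
def Pre_letter_dictionary (big_dict : List (String × List String)) : Prop :=
  ∀ p ∈ big_dict, (∀ w ∈ p.2, w ≠ "") ∧ (p.2 ≠ [] → p.1 ≠ "")
instance (big_dict : List (String × List String)) : Decidable (Pre_letter_dictionary big_dict) := by
  unfold Pre_letter_dictionary; infer_instance

def pvWitness_letter_dictionary : (List (String × List String)) :=
  [("apple", ["ab", "ba", "bc"]), ("bat", ["ab", "cd"]), ("cow", [])]

def Spec_letter_dictionary (big_dict : List (String × List String)) (out : List (String × List String)) : Prop := out = letter_dictionary_alt big_dict
instance (big_dict : List (String × List String)) (out : List (String × List String)) : Decidable (Spec_letter_dictionary big_dict out) := by unfold Spec_letter_dictionary; infer_instance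

-- ===== CLAIM (what is proved, stated in full; the proofs are below) =====
def Claim_equal_letter_dictionary : Prop := ∀ (big_dict : List (String × List String)), Dom_letter_dictionary big_dict → Pre_letter_dictionary big_dict → Spec_letter_dictionary big_dict (letter_dictionary big_dict)

-- ===== LEMMAS AND PROOFS =====

-- A's loop body seen at the level of one flattened pair (w0 = word[0], k0 = key[0]).
def pvPairStep (d : PySem.Dict String (List String)) (p : String × String) :
    PySem.Dict String (List String) :=
  let l := d.getD p.1 []
  if l ≠ [] then
    if p.2 ∉ l then d.insert p.1 (l ++ [p.2]) else d
  else d.insert p.1 [p.2]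

-- B's grouping, as a function of an arbitrary pair stream.
def pvVal (ps : List (String × String)) (w : String) : List String :=
  PySem.Set.ofList ((ps.filter (fun q => q.1 == w)).map Prod.snd)

def pvSpec (ps : List (String × String)) : List (String × List String) :=
  (PySem.Set.ofList (ps.map Prod.fst)).map (fun w => (w, pvVal ps w))

-- A's nested folds = a single fold of pvPairStep over the flattened pair stream.
theorem pv_inner_eq (ws : List String) (key : String) :
    ∀ d, ws.foldl (fun d word => letter_dictionary_word_step d key word) d
      = (ws.filterMap (letter_dictionary_alt_pair key)).foldl pvPairStep d := by
  induction ws with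
  | nil => intro d; rfl
  | cons w ws ih =>
    intro d
    rw [List.foldl_cons, List.filterMap_cons]
    cases hw : PySem.Str.pyGet? w 0 with
    | none =>
      have hd : letter_dictionary_word_step d key w = d := by
        simp only [letter_dictionary_word_step, hw]
      have hg : letter_dictionary_alt_pair key w = none := by
        simp only [letter_dictionary_alt_pair, hw]
      rw [hd, hg]; exact ih d
    | some wc =>
      cases hk : PySem.Str.pyGet? key 0 with
      | none =>
        have hd : letter_dictionary_word_step d key w = d := by
          simp only [letter_dictionary_word_step, hw, hk]
        have hg : letter_dictionary_alt_pair key w = none := by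
          simp only [letter_dictionary_alt_pair, hw, hk]
        rw [hd, hg]; exact ih d
      | some kc =>
        have hd : letter_dictionary_word_step d key w
            = pvPairStep d (String.ofList [wc], String.ofList [kc]) := by
          simp only [letter_dictionary_word_step, hw, hk]; rfl
        have hg : letter_dictionary_alt_pair key w
            = some (String.ofList [wc], String.ofList [kc]) := by
          simp only [letter_dictionary_alt_pair, hw, hk]
        rw [hd, hg, List.foldl_cons]
        exact ih _

theorem pv_fold_eq (bd : List (String × List String)) :
    ∀ d, bd.foldl (fun d kv =>
        kv.2.foldl (fun d word => letter_dictionary_word_step d kv.1 word) d) d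
      = (letter_dictionary_alt_pairs bd).foldl pvPairStep d := by
  induction bd with
  | nil => intro d; rfl
  | cons kv bd ih =>
    intro d
    simp only [List.foldl_cons, letter_dictionary_alt_pairs, List.flatMap_cons,
      List.foldl_append]
    rw [pv_inner_eq]
    exact ih _

-- find? of an equality test returns the element itself
theorem pv_find?_eq_self (l : List String) (w : String) (h : w ∈ l) :
    l.find? (fun x => x == w) = some w := by
  induction l with
  | nil => cases h
  | cons x l ih =>
    rw [List.find?_cons]
    cases hx : (x == w : Bool) with
    | true =>
      have : x = w := by simpa using hx
      simp [this]
    | false =>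
      have hm : w ∈ l := by
        cases List.mem_cons.mp h with
        | inl he => exact absurd (show (x == w : Bool) = true by simp [he]) (by simp [hx])
        | inr hm => exact hm
      simp [ih hm]

theorem pv_find?_eq_none (l : List String) (w : String) (h : w ∉ l) :
    l.find? (fun x => x == w) = none := by
  rw [List.find?_eq_none]
  intro x hx
  simp only [beq_iff_eq]
  exact fun hxy => h (hxy ▸ hx)

-- get? on the grouped dict
theorem pv_get?_spec (ps : List (String × String)) (w : String) :
    (PySem.Dict.mk (pvSpec ps)).get? w
      = if w ∈ PySem.Set.ofList (ps.map Prod.fst) then some (pvVal ps w) else none := by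
  have h0 : (PySem.Dict.mk (pvSpec ps)).get? w
      = ((pvSpec ps).find? (fun p => p.1 == w)).map (fun p => p.2) := rfl
  rw [h0, pvSpec, List.find?_map]
  by_cases h : w ∈ PySem.Set.ofList (ps.map Prod.fst)
  · have hf : (PySem.Set.ofList (ps.map Prod.fst)).find?
        ((fun p => (p.1 == w : Bool)) ∘ (fun w => (w, pvVal ps w))) = some w := by
      simpa [Function.comp] using pv_find?_eq_self _ w h
    simp [hf, h]
  · have hf : (PySem.Set.ofList (ps.map Prod.fst)).find?
        ((fun p => (p.1 == w : Bool)) ∘ (fun w => (w, pvVal ps w))) = none := by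
      simpa [Function.comp] using pv_find?_eq_none _ w h
    simp [hf, h]

-- the stored value at a present key is nonempty
theorem pv_val_ne_nil (ps : List (String × String)) (w : String)
    (h : w ∈ ps.map Prod.fst) : pvVal ps w ≠ [] := by
  rcases List.mem_map.mp h with ⟨q, hq, hq1⟩
  have hmem : q.2 ∈ (ps.filter (fun q => q.1 == w)).map Prod.snd :=
    List.mem_map_of_mem (List.mem_filter.mpr ⟨hq, by simp [hq1]⟩)
  have hin : q.2 ∈ pvVal ps w := by
    rw [pvVal]; exact (PySem.Set.mem_ofList _ _).mpr hmem
  intro hnil; rw [hnil] at hin; cases hin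

theorem pv_filter_absent (ps : List (String × String)) (w : String)
    (h : w ∉ ps.map Prod.fst) : ps.filter (fun q => q.1 == w) = [] := by
  rw [List.filter_eq_nil_iff]
  intro q hq
  simp only [beq_iff_eq]
  exact fun he => h (he ▸ List.mem_map_of_mem hq)

-- the heart: one pvPairStep commutes with the grouping
theorem pv_step_spec (ps : List (String × String)) (w k : String) :
    pvPairStep (PySem.Dict.mk (pvSpec ps)) (w, k)
      = PySem.Dict.mk (pvSpec (ps ++ [(w, k)])) := by
  have hfil : ∀ w' : String, (ps ++ [(w, k)]).filter (fun q => q.1 == w')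
      = ps.filter (fun q => q.1 == w') ++ if w = w' then [(w, k)] else [] := by
    intro w'
    by_cases hw : w = w' <;> simp [List.filter_append, hw]
  have hval : ∀ w' : String, pvVal (ps ++ [(w, k)]) w'
      = if w = w' then PySem.Set.add (pvVal ps w') k else pvVal ps w' := by
    intro w'
    rw [pvVal, hfil w']
    by_cases hw : w = w'
    · simp [hw, PySem.Set.ofList_append_singleton, pvVal]
    · simp [hw, pvVal]
  by_cases hmem : w ∈ PySem.Set.ofList (ps.map Prod.fst)
  · -- word-initial already present: the key list is unchanged
    have hmem' : w ∈ ps.map Prod.fst := (PySem.Set.mem_ofList _ _).mp hmem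
    have hfst : PySem.Set.ofList ((ps ++ [(w, k)]).map Prod.fst)
        = PySem.Set.ofList (ps.map Prod.fst) := by
      rw [List.map_append, List.map_singleton, PySem.Set.ofList_append_singleton,
        PySem.Set.add_eq_ite, if_pos hmem]
    have hl : (PySem.Dict.mk (pvSpec ps)).getD w [] = pvVal ps w := by
      simp [PySem.Dict.getD, pv_get?_spec, hmem]
    have hne : pvVal ps w ≠ [] := pv_val_ne_nil ps w hmem'
    have hrhs : pvSpec (ps ++ [(w, k)])
        = (PySem.Set.ofList (ps.map Prod.fst)).map (fun w' =>
            (w', if w = w' then PySem.Set.add (pvVal ps w') k else pvVal ps w')) := by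
      rw [pvSpec, hfst]
      exact List.map_congr_left fun w' _ => by rw [hval w']
    by_cases hk : k ∈ pvVal ps w
    · -- already recorded: A leaves the dict unchanged, B's add is the identity
      have hstep : pvPairStep (PySem.Dict.mk (pvSpec ps)) (w, k) = PySem.Dict.mk (pvSpec ps) := by
        simp [pvPairStep, hl, hne, hk]
      rw [hstep, hrhs]
      congr 1
      rw [pvSpec]
      apply List.map_congr_left
      intro w' _
      by_cases hw : w = w'
      · subst hw
        simp [hk]
      · simp [hw]
    · -- new key-initial: A appends to the stored list, B's add appends
      have hstep : pvPairStep (PySem.Dict.mk (pvSpec ps)) (w, k)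
          = (PySem.Dict.mk (pvSpec ps)).insert w (pvVal ps w ++ [k]) := by
        simp [pvPairStep, hl, hne, hk]
      have hcont : (PySem.Dict.mk (pvSpec ps)).contains w = true := by
        rw [PySem.Dict.contains_eq_isSome_get?, pv_get?_spec]
        simp [hmem]
      rw [hstep, hrhs]
      simp only [PySem.Dict.insert, hcont, if_true]
      congr 1
      show (pvSpec ps).map _ = _
      rw [pvSpec, List.map_map]
      apply List.map_congr_left
      intro w' _
      by_cases hw : w = w'
      · subst hw
        simp [Function.comp, hk]
      · have hw' : (w' == w : Bool) = false := by
          simp only [beq_eq_false_iff_ne]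
          exact fun he => hw he.symm
        simp [Function.comp, hw, hw']
  · -- fresh word-initial: both sides append a new entry
    have hmem' : w ∉ ps.map Prod.fst := fun h => hmem ((PySem.Set.mem_ofList _ _).mpr h)
    have hl : (PySem.Dict.mk (pvSpec ps)).getD w [] = [] := by
      simp [PySem.Dict.getD, pv_get?_spec, hmem]
    have hcont : (PySem.Dict.mk (pvSpec ps)).contains w = false := by
      rw [PySem.Dict.contains_eq_isSome_get?, pv_get?_spec]
      simp [hmem]
    have hstep : pvPairStep (PySem.Dict.mk (pvSpec ps)) (w, k)
        = (PySem.Dict.mk (pvSpec ps)).insert w [k] := by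
      simp [pvPairStep, hl]
    have hfst : PySem.Set.ofList ((ps ++ [(w, k)]).map Prod.fst)
        = PySem.Set.ofList (ps.map Prod.fst) ++ [w] := by
      rw [List.map_append, List.map_singleton, PySem.Set.ofList_append_singleton,
        PySem.Set.add_eq_ite, if_neg hmem]
    rw [hstep]
    simp only [PySem.Dict.insert, hcont]
    rw [if_neg (by simp)]
    congr 1
    show pvSpec ps ++ [(w, [k])] = _
    rw [pvSpec, pvSpec, hfst, List.map_append, List.map_singleton]
    congr 1
    · apply List.map_congr_left
      intro w' hw'
      have hne : ¬ w = w' := fun he => hmem' (he ▸ ((PySem.Set.mem_ofList _ _).mp hw' : w' ∈ ps.map Prod.fst))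
      rw [hval w', if_neg hne]
    · have hv : pvVal (ps ++ [(w, k)]) w = [k] := by
        rw [hval w, if_pos rfl, pvVal, pv_filter_absent ps w hmem']
        rfl
      rw [hv]

theorem pv_fold_spec (ps : List (String × String)) :
    ps.foldl pvPairStep PySem.Dict.empty = PySem.Dict.mk (pvSpec ps) := by
  induction ps using List.reverseRecOn with
  | nil => rfl
  | append_singleton ps p ih =>
    rw [List.foldl_append, List.foldl_cons, List.foldl_nil, ih]
    obtain ⟨w, k⟩ := p
    exact pv_step_spec ps w k

-- ===== VERDICT (by name: the statement is the Claim_ definition above) =====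
theorem letter_dictionary_spec : Claim_equal_letter_dictionary := by
  intro big_dict _ _
  unfold Spec_letter_dictionary letter_dictionary letter_dictionary_alt
  rw [pv_fold_eq big_dict PySem.Dict.empty, pv_fold_spec]
  rfl
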